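-- pv_equiv track=rewrite | github.com/daigo0927/ctci-6th | chap5/Q3_alt1.py | get_alternating_seqs
-- ===== SOURCE A (Python) =====
-- def get_alternating_seqs(n):
--     """
--     Get alternating sequences by flipping 0 and 1
--
--     Args: int n: input number
--     Returns: list<int>: list of length of 1s or 0s sequences
--     """
--     seqs = []
--
--     searching_for = 0
--     counter = 0
--     for i in range(len(bin(n))-2):
--         if (n&1) != searching_for:
--             seqs.append(counter)
--             searching_for = n&1
--             counter = 0
--
--         counter += 1
--         n >>= 1
--     seqs.append(counter)
--
--     return seqs
-- ===== SOURCE B (Python) =====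
-- def get_alternating_seqs(n):
--     width = len(bin(n)) - 2
--     bits = [(n >> i) & 1 for i in range(width)]
--     cuts = [0] + [i for i, (p, b) in enumerate(zip([0] + bits, bits)) if b != p] + [width]
--     return [q - p for p, q in zip(cuts, cuts[1:])]
-- ===== Notes on version B (the rewrite author's own statement) =====
-- stated objective: alternative
-- what changed: Replaces A's stateful scan (searching_for/counter carried through the loop, shifting n in place) with a declarative pipeline: build the bit list, locate change-point indices against the previous bit (virtual leading 0), and return adjacent differences of the boundary positions.
import Mathlib
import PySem

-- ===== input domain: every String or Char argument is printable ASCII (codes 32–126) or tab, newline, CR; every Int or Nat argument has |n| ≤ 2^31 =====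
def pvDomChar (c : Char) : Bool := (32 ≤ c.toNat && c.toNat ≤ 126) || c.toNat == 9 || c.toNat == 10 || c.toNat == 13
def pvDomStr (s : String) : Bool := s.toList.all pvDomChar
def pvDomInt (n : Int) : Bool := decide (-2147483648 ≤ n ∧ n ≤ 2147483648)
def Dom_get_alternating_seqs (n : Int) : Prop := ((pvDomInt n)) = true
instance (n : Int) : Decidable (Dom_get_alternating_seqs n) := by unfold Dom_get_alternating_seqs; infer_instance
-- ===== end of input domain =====

-- B computes the same run lengths by change-point detection over the explicit bit list
-- (boundary indices, then adjacent differences) instead of A's stateful scan; objective: alternative.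

-- len(bin(n)) - 2  (binary digit count of |n|, plus 1 for the '-' sign when n < 0); exact model of the builtin
def pyBinWidth (n : Int) : Nat :=
  (if n < 0 then 1 else 0) + max (PySem.Int.bitLength n) 1

-- ===== PORT A =====
-- the for-loop of A as structural recursion on the trip count; state = (n, searching_for, counter, seqs)
def aLoop : Nat → Int → Int → Int → List Int → List Int
  | 0, _, _, counter, seqs => seqs ++ [counter]
  | w+1, n, sf, counter, seqs =>
    if PySem.Int.band n 1 ≠ sf then
      aLoop w (n >>> (1 : Nat)) (PySem.Int.band n 1) 1 (seqs ++ [counter])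
    else
      aLoop w (n >>> (1 : Nat)) sf (counter + 1) seqs

def get_alternating_seqs (n : Int) : List Int :=
  aLoop (pyBinWidth n) n 0 0 []

-- ===== PORT B =====
def get_alternating_seqs_alt (n : Int) : List Int :=
  let width := pyBinWidth n
  let bits := (List.range width).map (fun (i : Nat) => PySem.Int.band (n >>> i) 1)
  let cuts := (0 : Int) ::
      ((PySem.List.enumerate (List.zip ((0:Int) :: bits) bits)).filterMap
        (fun x => if x.2.2 ≠ x.2.1 then some x.1 else none)) ++ [(width : Int)]
  (List.zip cuts cuts.tail).map (fun pq => pq.2 - pq.1)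

-- ===== PRECONDITION & SPEC =====
def Spec_get_alternating_seqs (n : Int) (out : List Int) : Prop := out = get_alternating_seqs_alt n
instance (n : Int) (out : List Int) : Decidable (Spec_get_alternating_seqs n out) := by unfold Spec_get_alternating_seqs; infer_instance

-- ===== CLAIM (what is proved, stated in full; the proofs are below) =====
def Claim_equal_get_alternating_seqs : Prop := ∀ (n : Int), Dom_get_alternating_seqs n → Spec_get_alternating_seqs n (get_alternating_seqs n)

-- ===== LEMMAS AND PROOFS =====

-- bit list read LSB-first (what port B's comprehension builds)
def bitsOf (n : Int) (w : Nat) : List Int :=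
  (List.range w).map (fun (i : Nat) => PySem.Int.band (n >>> i) 1)

-- change points: indices (from k) where the bit differs from the previous bit (virtual previous bit p)
def chg : Int → Int → List Int → List Int
  | _, _, [] => []
  | p, k, b :: bs => if b ≠ p then k :: chg b (k+1) bs else chg p (k+1) bs

-- adjacent differences (port B's last line)
def diffs (xs : List Int) : List Int :=
  (List.zip xs xs.tail).map (fun pq => pq.2 - pq.1)

theorem bitsOf_succ (n : Int) (w : Nat) :
    bitsOf n (w+1) = PySem.Int.band n 1 :: bitsOf (n >>> (1 : Nat)) w := by
  simp only [bitsOf, List.range_succ_eq_map, List.map_cons, List.map_map]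
  refine congrArg₂ _ (by rw [Int.shiftRight_zero]) ?_
  apply List.map_congr_left
  intro i _
  show PySem.Int.band (n >>> (Nat.succ i)) 1 = PySem.Int.band (n >>> (1:Nat) >>> i) 1
  rw [Nat.succ_eq_one_add, Int.shiftRight_add]

theorem enumerate_filter_eq_chg (bits : List Int) (p : Int) (k : Int) :
    (PySem.List.enumerate (List.zip (p :: bits) bits) k).filterMap
        (fun x => if x.2.2 ≠ x.2.1 then some x.1 else none) = chg p k bits := by
  induction bits generalizing p k with
  | nil => rfl
  | cons b bs ih =>
    simp only [List.zip_cons_cons, PySem.List.enumerate_cons, List.filterMap_cons, chg]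
    by_cases h : b = p
    · rw [if_neg (not_not_intro h), if_neg (not_not_intro h)]
      subst h
      exact ih b (k+1)
    · rw [if_pos h, if_pos h]
      exact congrArg (List.cons k) (ih b (k+1))

theorem diffs_cons_cons (x y : Int) (rest : List Int) :
    diffs (x :: y :: rest) = (y - x) :: diffs (y :: rest) := rfl

theorem aLoop_append (w : Nat) (n sf c : Int) (s : List Int) :
    aLoop w n sf c s = s ++ aLoop w n sf c [] := by
  induction w generalizing n sf c s with
  | zero => simp [aLoop]
  | succ w ih =>
    simp only [aLoop]
    by_cases h : PySem.Int.band n 1 ≠ sf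
    · rw [if_pos h, if_pos h, ih _ _ 1 (s ++ [c]), ih _ _ 1 ([] ++ [c])]
      simp
    · rw [if_neg h, if_neg h]
      exact ih _ _ _ _

-- main invariant: diffs of ((k - c) :: change points ++ [end marker]) = A's loop with current-run count c
theorem diffs_chg_eq_aLoop (w : Nat) (n p k c : Int) :
    diffs ((k - c) :: (chg p k (bitsOf n w) ++ [k + (w : Int)])) = aLoop w n p c [] := by
  induction w generalizing n p k c with
  | zero =>
    show diffs ((k - c) :: ([] ++ [k + ((0:Nat) : Int)])) = [c]
    simp [diffs]
  | succ w ih =>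
    rw [bitsOf_succ]
    simp only [chg, aLoop]
    have hc : (k : Int) + ((w + 1 : Nat) : Int) = (k + 1) + (w : Int) := by push_cast; ring
    by_cases h : PySem.Int.band n 1 ≠ p
    · rw [if_pos h, if_pos h, aLoop_append _ _ _ _ ([] ++ [c])]
      simp only [List.cons_append]
      rw [diffs_cons_cons, hc]
      have hI := ih (n >>> (1:Nat)) (PySem.Int.band n 1) (k+1) 1
      rw [show (k + 1 - 1 : Int) = k by ring] at hI
      rw [hI]
      simp [sub_sub_cancel]
    · rw [if_neg h, if_neg h, hc]
      have hI := ih (n >>> (1:Nat)) p (k+1) (c+1)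
      rw [show (k + 1 - (c + 1) : Int) = k - c by ring] at hI
      exact hI

-- ===== VERDICT (by name: the statement is the Claim_ definition above) =====
theorem get_alternating_seqs_spec : Claim_equal_get_alternating_seqs := by
  intro n _
  show get_alternating_seqs n = get_alternating_seqs_alt n
  have hB : get_alternating_seqs_alt n =
      diffs (((0:Int) - 0) :: (chg 0 0 (bitsOf n (pyBinWidth n)) ++ [(0:Int) + (pyBinWidth n : Int)])) := by
    show (fun cuts => (List.zip cuts cuts.tail).map (fun pq => pq.2 - pq.1))
        ((0 : Int) ::
          ((PySem.List.enumerate (List.zip ((0:Int) :: bitsOf n (pyBinWidth n)) (bitsOf n (pyBinWidth n)))).filterMap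
            (fun x => if x.2.2 ≠ x.2.1 then some x.1 else none)) ++ [(pyBinWidth n : Int)]) = _
    rw [enumerate_filter_eq_chg]
    show diffs (0 :: (chg 0 0 (bitsOf n (pyBinWidth n)) ++ [(pyBinWidth n : Int)])) = _
    norm_num
  rw [hB, diffs_chg_eq_aLoop]
  rfl
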